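-- pv_equiv track=rewrite | github.com/copenlu/pk-ck-knowledge-disentanglement | code/generate_answer_cot.py | find_first_json_object
-- ===== SOURCE A (Python) =====
-- def find_first_json_object(text: str):
--     """Return (json_substring, start_idx, end_idx) for the first complete {...} found in text.
--     Handles quotes/escapes so braces inside strings don't break the scan.
--     end_idx is exclusive."""
--     i = text.find('{')
--     if i == -1:
--         return None, -1, -1
--     depth = 0
--     in_str = False
--     esc = False
--     start = i
--     for j in range(i, len(text)):
--         ch = text[j]
--         if in_str:
--             if esc:
--                 esc = False
--             elif ch == '\\':
--                 esc = True
--             elif ch == '"':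
--                 in_str = False
--         else:
--             if ch == '"':
--                 in_str = True
--             elif ch == '{':
--                 depth += 1
--             elif ch == '}':
--                 depth -= 1
--                 if depth == 0:
--                     return text[start:j+1], start, j+1
--     return None, -1, -1
-- ===== SOURCE B (Python) =====
-- def find_first_json_object(text: str):
--     """Return (json_substring, start_idx, end_idx) for the first complete {...} in text.
--     Explicit index scan with a depth counter; a nested inner loop consumes each
--     string literal whole (stepping 2 over backslash-escapes) instead of carrying
--     in_str/esc flags through a single state machine."""
--     start = text.find('{')
--     if start == -1:
--         return None, -1, -1
--     n = len(text)
--     depth = 0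
--     j = start
--     while j < n:
--         ch = text[j]
--         if ch == '{':
--             depth += 1
--         elif ch == '}':
--             depth -= 1
--             if depth == 0:
--                 return text[start:j+1], start, j+1
--         elif ch == '"':
--             k = j + 1
--             while k < n:
--                 if text[k] == '\\':
--                     k += 2
--                 elif text[k] == '"':
--                     break
--                 else:
--                     k += 1
--             j = k
--         j += 1
--     return None, -1, -1
-- ===== Notes on version B (the rewrite author's own statement) =====
-- stated objective: alternative
-- what changed: Replaced A's single-pass state machine carrying in_str/esc boolean flags by an explicit-index depth-counter scan whose nested inner loop consumes each string literal whole (stepping 2 over backslash escapes), so the outer loop sees no string-mode state at all.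
import Mathlib
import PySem

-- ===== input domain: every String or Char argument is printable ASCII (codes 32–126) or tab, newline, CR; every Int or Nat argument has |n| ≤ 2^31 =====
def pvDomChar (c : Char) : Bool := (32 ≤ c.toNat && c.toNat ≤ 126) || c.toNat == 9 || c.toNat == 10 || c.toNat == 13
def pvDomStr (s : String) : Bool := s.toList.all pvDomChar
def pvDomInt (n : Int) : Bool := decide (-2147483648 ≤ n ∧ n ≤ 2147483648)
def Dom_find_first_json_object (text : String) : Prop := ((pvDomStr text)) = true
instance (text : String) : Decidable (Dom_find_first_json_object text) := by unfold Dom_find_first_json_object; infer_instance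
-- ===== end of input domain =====

-- B replaces A's single state machine (in_str/esc flags) by a depth-counter scan with a
-- nested consumer that swallows each string literal whole; objective: alternative decomposition.

-- ===== PORT A =====
-- A's for-loop over j in range(i, len(text)) with state (depth, in_str, esc), as a
-- structural recursion over the chars from position i, carrying the index j.
def pvLoopA (s : List Char) (cs : List Char) (j : Int) (depth : Int)
    (instr esc : Bool) (start : Int) : Option String × Int × Int :=
  match cs with
  | [] => (none, -1, -1)
  | ch :: rest =>
    if instr then
      if esc then pvLoopA s rest (j + 1) depth true false start
      else if ch = '\\' then pvLoopA s rest (j + 1) depth true true start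
      else if ch = '"' then pvLoopA s rest (j + 1) depth false false start
      else pvLoopA s rest (j + 1) depth true false start
    else
      if ch = '"' then pvLoopA s rest (j + 1) depth true esc start
      else if ch = '{' then pvLoopA s rest (j + 1) (depth + 1) instr esc start
      else if ch = '}' then
        if depth - 1 = 0 then
          (some (String.ofList (PySem.List.slice s (some start) (some (j + 1)))), start, j + 1)
        else pvLoopA s rest (j + 1) (depth - 1) instr esc start
      else pvLoopA s rest (j + 1) depth instr esc start

def find_first_json_object (text : String) : Option String × Int × Int :=
  if PySem.Str.find text "{" = -1 then (none, -1, -1)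
  else pvLoopA text.toList (text.toList.drop (PySem.Str.find text "{").toNat)
        (PySem.Str.find text "{") 0 false false (PySem.Str.find text "{")

-- ===== PORT B =====
-- Source B's inner while-loop: consume a string literal whose opening quote was just read;
-- k+=2 on a backslash; some (chars after the closing quote, its index) on an unescaped
-- quote; none exactly when the loop runs off the end of the text.
def pvConsumeStr (cs : List Char) (k : Int) : Option (List Char × Int) :=
  match cs with
  | [] => none
  | c :: rest =>
    if c = '\\' then
      match rest with
      | [] => none
      | _ :: rest2 => pvConsumeStr rest2 (k + 2)
    else if c = '"' then some (rest, k)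
    else pvConsumeStr rest (k + 1)

-- termination measure for pvLoopB: the consumer strictly shortens the char list
theorem pvConsumeStr_len_aux : ∀ (n : Nat) (cs : List Char), cs.length ≤ n →
    ∀ (k : Int) (r : List Char) (k' : Int),
    pvConsumeStr cs k = some (r, k') → r.length < cs.length := by
  intro n
  induction n with
  | zero =>
    intro cs hcs k r k' h
    match cs with
    | [] => simp [pvConsumeStr] at h
    | c :: rest => simp at hcs
  | succ n ih =>
    intro cs hcs k r k' h
    match cs with
    | [] => simp [pvConsumeStr] at h
    | c :: rest =>
      simp only [List.length_cons, Nat.succ_le_succ_iff] at hcs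
      rw [pvConsumeStr.eq_def] at h
      by_cases h1 : c = '\\'
      · match rest with
        | [] => simp [h1] at h
        | d :: rest2 =>
          simp only [h1, if_pos] at h
          have := ih rest2 (by simp at hcs; omega) (k + 2) r k' h
          simp; omega
      · by_cases h2 : c = '"'
        · subst h2
          simp at h
          obtain ⟨rfl, rfl⟩ := h
          simp
        · simp [h1, h2] at h
          have := ih rest hcs (k + 1) r k' h
          simp; omega

theorem pvConsumeStr_length (cs : List Char) (k : Int) (r : List Char) (k' : Int)
    (h : pvConsumeStr cs k = some (r, k')) : r.length < cs.length :=
  pvConsumeStr_len_aux cs.length cs le_rfl k r k' h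

-- Source B's outer while-loop: explicit index j and a depth counter only.
def pvLoopB (s : List Char) (cs : List Char) (j : Int) (depth : Int)
    (start : Int) : Option String × Int × Int :=
  match cs with
  | [] => (none, -1, -1)
  | c :: rest =>
    if c = '{' then pvLoopB s rest (j + 1) (depth + 1) start
    else if c = '}' then
      if depth - 1 = 0 then
        (some (String.ofList (PySem.List.slice s (some start) (some (j + 1)))), start, j + 1)
      else pvLoopB s rest (j + 1) (depth - 1) start
    else if c = '"' then
      match hc : pvConsumeStr rest (j + 1) with
      | none => (none, -1, -1)
      | some (rest', k) => pvLoopB s rest' (k + 1) depth start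
    else pvLoopB s rest (j + 1) depth start
termination_by cs.length
decreasing_by
  · simp
  · simp
  · exact Nat.lt_trans (pvConsumeStr_length _ _ _ _ hc) (by simp)
  · simp

def find_first_json_object_alt (text : String) : Option String × Int × Int :=
  if PySem.Str.find text "{" = -1 then (none, -1, -1)
  else pvLoopB text.toList (text.toList.drop (PySem.Str.find text "{").toNat)
        (PySem.Str.find text "{") 0 (PySem.Str.find text "{")

-- ===== PRECONDITION & SPEC =====
def Spec_find_first_json_object (text : String) (out : Option String × Int × Int) : Prop := out = find_first_json_object_alt text
instance (text : String) (out : Option String × Int × Int) : Decidable (Spec_find_first_json_object text out) := by unfold Spec_find_first_json_object; infer_instance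

-- ===== CLAIM (what is proved, stated in full; the proofs are below) =====
def Claim_equal_find_first_json_object : Prop := ∀ (text : String), Dom_find_first_json_object text → Spec_find_first_json_object text (find_first_json_object text)

-- ===== LEMMAS AND PROOFS =====

-- one-step unfoldings of the two loops and the consumer
theorem pvConsumeStr_cons_backslash (d : Char) (rest2 : List Char) (k : Int) :
    pvConsumeStr ('\\' :: d :: rest2) k = pvConsumeStr rest2 (k + 2) := by
  conv_lhs => rw [pvConsumeStr.eq_def]
  simp

theorem pvConsumeStr_cons_other (c : Char) (rest : List Char) (k : Int)
    (h1 : ¬ c = '\\') (h2 : ¬ c = '"') :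
    pvConsumeStr (c :: rest) k = pvConsumeStr rest (k + 1) := by
  conv_lhs => rw [pvConsumeStr.eq_def]
  simp [h1, h2]

theorem pvLoopA_cons (s : List Char) (c : Char) (rest : List Char)
    (j depth : Int) (instr esc : Bool) (start : Int) :
    pvLoopA s (c :: rest) j depth instr esc start =
      (if instr then
        if esc then pvLoopA s rest (j + 1) depth true false start
        else if c = '\\' then pvLoopA s rest (j + 1) depth true true start
        else if c = '"' then pvLoopA s rest (j + 1) depth false false start
        else pvLoopA s rest (j + 1) depth true false start
      else
        if c = '"' then pvLoopA s rest (j + 1) depth true esc start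
        else if c = '{' then pvLoopA s rest (j + 1) (depth + 1) instr esc start
        else if c = '}' then
          if depth - 1 = 0 then
            (some (String.ofList (PySem.List.slice s (some start) (some (j + 1)))), start, j + 1)
          else pvLoopA s rest (j + 1) (depth - 1) instr esc start
        else pvLoopA s rest (j + 1) depth instr esc start) := by
  conv_lhs => rw [pvLoopA.eq_def]

theorem pvLoopB_cons_brace (s : List Char) (rest : List Char) (j depth start : Int) :
    pvLoopB s ('{' :: rest) j depth start = pvLoopB s rest (j + 1) (depth + 1) start := by
  rw [pvLoopB.eq_def]; simp

theorem pvLoopB_cons_close (s : List Char) (rest : List Char) (j depth start : Int) :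
    pvLoopB s ('}' :: rest) j depth start =
      (if depth - 1 = 0 then
        ((some (String.ofList (PySem.List.slice s (some start) (some (j + 1)))) : Option String), start, j + 1)
      else pvLoopB s rest (j + 1) (depth - 1) start) := by
  rw [pvLoopB.eq_def]; simp

theorem pvLoopB_cons_quote_none (s : List Char) (rest : List Char) (j depth start : Int)
    (hc : pvConsumeStr rest (j + 1) = none) :
    pvLoopB s ('"' :: rest) j depth start = (none, -1, -1) := by
  rw [pvLoopB.eq_def]
  simp
  split
  · rfl
  · next rest' k heq => rw [hc] at heq; cases heq

theorem pvLoopB_cons_quote_some (s : List Char) (rest rest' : List Char) (j k depth start : Int)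
    (hc : pvConsumeStr rest (j + 1) = some (rest', k)) :
    pvLoopB s ('"' :: rest) j depth start = pvLoopB s rest' (k + 1) depth start := by
  rw [pvLoopB.eq_def]
  simp
  split
  · next heq => rw [hc] at heq; cases heq
  · next r2 k2 heq =>
      rw [hc] at heq
      cases heq
      rfl

theorem pvLoopB_cons_other (s : List Char) (c : Char) (rest : List Char) (j depth start : Int)
    (h1 : ¬ c = '{') (h2 : ¬ c = '}') (h3 : ¬ c = '"') :
    pvLoopB s (c :: rest) j depth start = pvLoopB s rest (j + 1) depth start := by
  rw [pvLoopB.eq_def]; simp [h1, h2, h3]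

-- In string mode, A's state machine computes exactly: consume the literal, then resume.
theorem pvLoopA_instr (s : List Char) : ∀ (n : Nat) (cs : List Char), cs.length ≤ n →
    ∀ (j depth start : Int),
    pvLoopA s cs j depth true false start =
      (match pvConsumeStr cs j with
       | none => (none, -1, -1)
       | some (rest', k) => pvLoopA s rest' (k + 1) depth false false start) := by
  intro n
  induction n with
  | zero =>
    intro cs hcs j depth start
    match cs with
    | [] => simp [pvLoopA, pvConsumeStr]
    | c :: rest => simp at hcs
  | succ n ih =>
    intro cs hcs j depth start
    match cs with
    | [] => simp [pvLoopA, pvConsumeStr]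
    | c :: rest =>
      simp only [List.length_cons, Nat.succ_le_succ_iff] at hcs
      by_cases h1 : c = '\\'
      · subst h1
        match rest with
        | [] =>
          rw [pvLoopA_cons, if_pos (by rfl), if_neg (by simp), if_pos rfl]
          conv_rhs => rw [pvConsumeStr.eq_def]
          simp [pvLoopA]
        | d :: rest2 =>
          rw [pvLoopA_cons, if_pos (by rfl), if_neg (by simp), if_pos rfl]
          rw [pvLoopA_cons, if_pos (by rfl), if_pos rfl]
          rw [pvConsumeStr_cons_backslash]
          rw [show j + 1 + 1 = j + 2 by ring]
          exact ih rest2 (by simp at hcs; omega) (j + 2) depth start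
      · by_cases h2 : c = '"'
        · subst h2
          rw [pvLoopA_cons, if_pos (by rfl), if_neg (by simp), if_neg (by decide), if_pos rfl]
          conv_rhs => rw [pvConsumeStr.eq_def]
          simp
        · rw [pvLoopA_cons, if_pos (by rfl), if_neg (by simp), if_neg h1, if_neg h2]
          rw [pvConsumeStr_cons_other c rest j h1 h2]
          exact ih rest hcs (j + 1) depth start

-- Outside strings, A's state machine and B's depth-counter scan agree.
theorem pvLoopA_eq_pvLoopB (s : List Char) : ∀ (n : Nat) (cs : List Char), cs.length ≤ n →
    ∀ (j depth start : Int),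
    pvLoopA s cs j depth false false start = pvLoopB s cs j depth start := by
  intro n
  induction n with
  | zero =>
    intro cs hcs j depth start
    match cs with
    | [] => simp [pvLoopA, pvLoopB]
    | c :: rest => simp at hcs
  | succ n ih =>
    intro cs hcs j depth start
    match cs with
    | [] => simp [pvLoopA, pvLoopB]
    | c :: rest =>
      simp only [List.length_cons, Nat.succ_le_succ_iff] at hcs
      rw [pvLoopA_cons, if_neg (by simp)]
      by_cases h1 : c = '"'
      · subst h1
        rw [if_pos rfl]
        rw [pvLoopA_instr s rest.length rest le_rfl (j + 1) depth start]
        cases hc : pvConsumeStr rest (j + 1) with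
        | none => rw [pvLoopB_cons_quote_none s rest j depth start hc]
        | some p =>
          obtain ⟨rest', k⟩ := p
          rw [pvLoopB_cons_quote_some s rest rest' j k depth start hc]
          have := pvConsumeStr_length rest (j + 1) rest' k hc
          exact ih rest' (by omega) (k + 1) depth start
      · rw [if_neg h1]
        by_cases h2 : c = '{'
        · subst h2
          rw [if_pos rfl, pvLoopB_cons_brace]
          exact ih rest hcs (j + 1) (depth + 1) start
        · rw [if_neg h2]
          by_cases h3 : c = '}'
          · subst h3
            rw [if_pos rfl, pvLoopB_cons_close]
            by_cases h4 : depth - 1 = 0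
            · rw [if_pos h4, if_pos h4]
            · rw [if_neg h4, if_neg h4]
              exact ih rest hcs (j + 1) (depth - 1) start
          · rw [if_neg h3, pvLoopB_cons_other s c rest j depth start h2 h3 h1]
            exact ih rest hcs (j + 1) depth start

-- ===== VERDICT (by name: the statement is the Claim_ definition above) =====
theorem find_first_json_object_spec : Claim_equal_find_first_json_object := by
  intro text _
  unfold Spec_find_first_json_object find_first_json_object find_first_json_object_alt
  by_cases h : PySem.Str.find text "{" = -1
  · rw [if_pos h, if_pos h]
  · rw [if_neg h, if_neg h]
    exact pvLoopA_eq_pvLoopB text.toList _ _ le_rfl _ 0 _
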